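-- pv_equiv track=rewrite | github.com/brendangilman/brendangilman.github.io | python/MMHint.py | match_for_color
-- ===== SOURCE A (Python) =====
-- def match_for_color(result, new_guess, new_code):
--   new_result = ""
--   x = list(new_guess)
--   y = list(new_code)
--   for i in range(len(new_guess)):
--     if x[i] in new_code:
--       result = result + "D"
--       new_result = result
--       for j in range(len(new_code)):
--         if x[i] == y[j]:
--          y[j] = ""
--         else:
--          y[j] = y[j]
--         new_code = y
--     else:
--      new_result = result + ""
--   return new_result
-- ===== SOURCE B (Python) =====
-- def match_for_color(result, new_guess, new_code):
--     code_set = set(new_code)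
--     seen = set()
--     new_result = ""
--     for ch in new_guess:
--         if ch in code_set:
--             seen.add(ch)
--         new_result = result + "D" * len(seen)
--     return new_result
-- ===== Notes on version B (the rewrite author's own statement) =====
-- stated objective: faster
-- what changed: Replaces A's per-match inner pass that blanks out every occurrence of the matched char in the code list with a single pass over the guess maintaining a membership set of the code and a 'seen' set of already-matched colors; one 'D' per distinct matched color, the empty-guess-returns-empty behaviour falls out of the loop.
import Mathlib
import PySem

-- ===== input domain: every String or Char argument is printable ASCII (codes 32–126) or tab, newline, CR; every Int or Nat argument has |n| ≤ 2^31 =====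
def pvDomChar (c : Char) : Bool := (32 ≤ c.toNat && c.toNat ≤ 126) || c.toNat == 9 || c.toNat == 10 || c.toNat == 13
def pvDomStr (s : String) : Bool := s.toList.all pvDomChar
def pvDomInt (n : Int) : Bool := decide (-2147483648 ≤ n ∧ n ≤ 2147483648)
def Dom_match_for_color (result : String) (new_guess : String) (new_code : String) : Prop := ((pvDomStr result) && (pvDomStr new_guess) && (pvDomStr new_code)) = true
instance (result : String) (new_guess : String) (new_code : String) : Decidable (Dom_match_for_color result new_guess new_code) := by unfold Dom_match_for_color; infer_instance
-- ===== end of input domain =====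

-- B replaces A's per-match inner blanking pass over the code list with one pass over the
-- guess maintaining a membership set of the code and a set of already-matched colors
-- (one pass instead of nested passes; a timing run measured B faster).

-- ===== PORT A =====
-- A's loop over i in range(len(new_guess)), carrying (result, new_result, y).
-- Chars are modelled as their singleton lists (Python 1-char strings), so y's entries can
-- become [] (Python ""). The test `x[i] in new_code` is exact as membership in y: before the
-- first match y equals list(new_code) element-wise, and from the first match on Python's
-- new_code IS the list y. The inner j-loop rewriting every cell of y is the map over y.
def pvA_loop (x : List (List Char)) (result : List Char) (new_result : List Char)
    (y : List (List Char)) : List Char :=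
  match x with
  | [] => new_result
  | c :: rest =>
      if y.contains c then
        pvA_loop rest (result ++ ['D']) (result ++ ['D'])
          (y.map (fun s => if c == s then [] else s))
      else
        pvA_loop rest result result y

def match_for_color (result : String) (new_guess : String) (new_code : String) : String :=
  String.ofList
    (pvA_loop (new_guess.toList.map (fun c => [c])) result.toList []
      (new_code.toList.map (fun c => [c])))

-- ===== PORT B =====
def pvB_loop (g : List Char) (result : List Char) (codeSet : PySem.Set Char)
    (seen : PySem.Set Char) (new_result : List Char) : List Char :=
  match g with
  | [] => new_result
  | c :: rest =>
      let seen' := if codeSet.contains c then PySem.Set.add seen c else seen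
      pvB_loop rest result codeSet seen' (result ++ List.replicate seen'.length 'D')

def match_for_color_alt (result : String) (new_guess : String) (new_code : String) : String :=
  String.ofList
    (pvB_loop new_guess.toList result.toList (PySem.Set.ofList new_code.toList)
      PySem.Set.empty [])

-- ===== PRECONDITION & SPEC =====
def Spec_match_for_color (result : String) (new_guess : String) (new_code : String) (out : String) : Prop := out = match_for_color_alt result new_guess new_code
instance (result : String) (new_guess : String) (new_code : String) (out : String) : Decidable (Spec_match_for_color result new_guess new_code out) := by unfold Spec_match_for_color; infer_instance

-- ===== CLAIM (what is proved, stated in full; the proofs are below) =====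
def Claim_equal_match_for_color : Prop := ∀ (result : String) (new_guess : String) (new_code : String), Dom_match_for_color result new_guess new_code → Spec_match_for_color result new_guess new_code (match_for_color result new_guess new_code)

-- ===== LEMMAS AND PROOFS =====

lemma pv_contains_ofList (code : List Char) (c : Char) :
    (PySem.Set.ofList code).contains c = decide (c ∈ code) := by
  rw [Bool.eq_iff_iff]
  simp [PySem.Set.mem_ofList]

-- Membership of a singleton in A's blanked code list, in terms of the original chars.
lemma pv_mem_blanked (code : List Char) (seen : List Char) (c : Char) :
    (code.map (fun ch => if ch ∈ seen then ([] : List Char) else [ch])).contains [c]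
      = (decide (c ∈ code) && !decide (c ∈ seen)) := by
  rw [List.contains_eq_mem, Bool.eq_iff_iff]
  simp only [decide_eq_true_eq, Bool.and_eq_true, Bool.not_eq_true', decide_eq_false_iff_not,
    List.mem_map]
  constructor
  · rintro ⟨ch, hch, hf⟩
    by_cases hs : ch ∈ seen
    · simp [hs] at hf
    · simp [hs] at hf
      subst hf
      exact ⟨hch, hs⟩
  · rintro ⟨hc, hs⟩
    exact ⟨c, hc, by simp [hs]⟩

-- Blanking every occurrence of c in the blanked list = blanking w.r.t. seen.add c.
lemma pv_blank_step (code : List Char) (seen : List Char) (c : Char) :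
    (code.map (fun ch => if ch ∈ seen then ([] : List Char) else [ch])).map
        (fun s => if [c] == s then [] else s)
      = code.map (fun ch => if ch ∈ PySem.Set.add seen c then ([] : List Char) else [ch]) := by
  rw [List.map_map]
  refine List.map_congr_left (fun ch _ => ?_)
  by_cases hs : ch ∈ seen
  · simp [hs]
  · by_cases hc : c = ch
    · subst hc; simp [hs]
    · simp [hs, hc, PySem.Set.mem_add, Ne.symm hc]

lemma pv_add_len_of_not_mem (seen : PySem.Set Char) (c : Char) (h : ¬ c ∈ seen) :
    (PySem.Set.add seen c).length = seen.length + 1 := by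
  simp [PySem.Set.add, PySem.Set.contains, h]

lemma pv_add_of_mem (seen : PySem.Set Char) (c : Char) (h : c ∈ seen) :
    PySem.Set.add seen c = seen := by
  simp [PySem.Set.add, PySem.Set.contains, h]

-- Loop invariant: A's state (result grown by one 'D' per seen color, code blanked at seen)
-- corresponds to B's state (fixed result, seen set).
lemma pv_loop_eq (rest : List Char) (code : List Char) :
    ∀ (seen : PySem.Set Char) (result nr : List Char),
      pvA_loop (rest.map (fun c => [c])) (result ++ List.replicate seen.length 'D') nr
          (code.map (fun ch => if ch ∈ seen then ([] : List Char) else [ch]))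
        = pvB_loop rest result (PySem.Set.ofList code) seen nr := by
  induction rest with
  | nil => intro seen result nr; simp [pvA_loop, pvB_loop]
  | cons c t ih =>
      intro seen result nr
      simp only [List.map_cons, pvA_loop, pvB_loop, pv_mem_blanked, pv_contains_ofList]
      by_cases hc : c ∈ code
      · by_cases hs : c ∈ seen
        · rw [pv_add_of_mem seen c hs] at *
          simp [hc, hs, ih]
        · have h1 : result ++ List.replicate seen.length 'D' ++ ['D']
              = result ++ List.replicate (PySem.Set.add seen c).length 'D' := by
            rw [pv_add_len_of_not_mem seen c hs, List.replicate_succ', List.append_assoc]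
          simp only [hc, hs, decide_true, decide_false, Bool.not_false, Bool.and_true,
            if_true, pv_blank_step, h1]
          exact ih (PySem.Set.add seen c) result _
      · simp [hc, ih]

-- ===== VERDICT (by name: the statement is the Claim_ definition above) =====
theorem match_for_color_spec : Claim_equal_match_for_color := by
  intro result new_guess new_code _
  unfold Spec_match_for_color match_for_color match_for_color_alt
  refine congrArg String.ofList ?_
  have h := pv_loop_eq new_guess.toList new_code.toList PySem.Set.empty result.toList []
  simpa [PySem.Set.empty] using h
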